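-- pv_equiv track=rewrite | github.com/Ievgen-1978/cmr-rmpd-new | app.py | get_vehicle_gps
-- ===== SOURCE A (Python) =====
-- def get_vehicle_gps(truck, vehicles):
--     if not truck:
--         return '', ''
--     truck_upper = truck.upper().replace(' ', '')
--     # Точне співпадіння
--     for v in vehicles:
--         if v['truck'].upper().replace(' ', '') == truck_upper:
--             return v.get('gps', ''), v.get('gps_backup', '')
--     # Нечітке: починається з розпізнаного номера або навпаки
--     for v in vehicles:
--         catalog_truck = v['truck'].upper().replace(' ', '')
--         if catalog_truck.startswith(truck_upper) or truck_upper.startswith(catalog_truck[:6]):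
--             return v.get('gps', ''), v.get('gps_backup', '')
--     return '', ''
-- ===== SOURCE B (Python) =====
-- def get_vehicle_gps(truck, vehicles):
--     if not truck:
--         return '', ''
--     norm = lambda s: s.upper().replace(' ', '')
--     target = norm(truck)
--     fallback = None
--     for v in vehicles:
--         catalog = norm(v['truck'])
--         if catalog == target:
--             return v.get('gps', ''), v.get('gps_backup', '')
--         if fallback is None and (catalog.startswith(target) or target.startswith(catalog[:6])):
--             fallback = (v.get('gps', ''), v.get('gps_backup', ''))
--     return fallback if fallback is not None else ('', '')
-- ===== Notes on version B (the rewrite author's own statement) =====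
-- stated objective: alternative
-- what changed: Replaced A's two sequential passes (exact pass, then fuzzy pass) by a single pass that returns on an exact match and remembers the first fuzzy candidate as a fallback, normalizing the truck number once up front.
import Mathlib
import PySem

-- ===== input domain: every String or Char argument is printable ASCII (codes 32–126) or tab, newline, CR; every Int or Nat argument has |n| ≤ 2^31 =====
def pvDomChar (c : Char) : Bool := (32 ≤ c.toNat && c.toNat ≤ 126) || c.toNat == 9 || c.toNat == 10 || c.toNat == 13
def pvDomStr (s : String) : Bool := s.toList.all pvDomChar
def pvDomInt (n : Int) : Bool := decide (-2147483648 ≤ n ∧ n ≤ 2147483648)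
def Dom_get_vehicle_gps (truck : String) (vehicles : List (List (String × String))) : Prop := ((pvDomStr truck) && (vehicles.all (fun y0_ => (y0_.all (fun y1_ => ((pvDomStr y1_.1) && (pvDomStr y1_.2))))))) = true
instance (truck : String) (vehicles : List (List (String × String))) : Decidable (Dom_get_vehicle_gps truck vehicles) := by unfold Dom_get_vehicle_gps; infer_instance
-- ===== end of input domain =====

-- B replaces A's two passes over `vehicles` by a single pass that remembers the first
-- fuzzy candidate while still scanning for an exact match (objective: alternative/simpler).

-- ===== PORT A =====
-- first loop: exact normalized match; v['truck'] with a missing key is a KeyError,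
-- excluded by Pre_; the port reads it with default "" there.
def pvA_exact (tu : String) : List (List (String × String)) → Option (String × String)
  | [] => none
  | v :: rest =>
    if PySem.Str.replace (PySem.Str.upper (((PySem.Dict.mk v).get? "truck").getD "")) " " "" = tu then
      some ((PySem.Dict.mk v).getD "gps" "", (PySem.Dict.mk v).getD "gps_backup" "")
    else pvA_exact tu rest

-- second loop: fuzzy match (prefix either way, catalog cut to 6 chars)
def pvA_fuzzy (tu : String) : List (List (String × String)) → Option (String × String)
  | [] => none
  | v :: rest =>
    let catalog := PySem.Str.replace (PySem.Str.upper (((PySem.Dict.mk v).get? "truck").getD "")) " " ""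
    if PySem.Str.startswith catalog tu || PySem.Str.startswith tu (PySem.Str.slice catalog none (some 6)) then
      some ((PySem.Dict.mk v).getD "gps" "", (PySem.Dict.mk v).getD "gps_backup" "")
    else pvA_fuzzy tu rest

def get_vehicle_gps (truck : String) (vehicles : List (List (String × String))) : String × String :=
  if truck.toList = [] then ("", "")
  else
    let truck_upper := PySem.Str.replace (PySem.Str.upper truck) " " ""
    match pvA_exact truck_upper vehicles with
    | some r => r
    | none =>
      match pvA_fuzzy truck_upper vehicles with
      | some r => r
      | none => ("", "")

-- ===== PORT B =====
def pvNorm (s : String) : String := PySem.Str.replace (PySem.Str.upper s) " " ""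

-- single pass: return at an exact match, remember the first fuzzy candidate
def pvB_scan (target : String) (fallback : Option (String × String)) :
    List (List (String × String)) → String × String
  | [] => fallback.getD ("", "")
  | v :: rest =>
    let d := PySem.Dict.mk v
    let catalog := pvNorm ((d.get? "truck").getD "")
    if catalog = target then (d.getD "gps" "", d.getD "gps_backup" "")
    else
      let fallback' :=
        if fallback.isNone &&
            (PySem.Str.startswith catalog target ||
             PySem.Str.startswith target (PySem.Str.slice catalog none (some 6))) then
          some (d.getD "gps" "", d.getD "gps_backup" "")
        else fallback
      pvB_scan target fallback' rest

def get_vehicle_gps_alt (truck : String) (vehicles : List (List (String × String))) : String × String :=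
  if truck.toList = [] then ("", "")
  else pvB_scan (pvNorm truck) none vehicles

-- ===== PRECONDITION & SPEC =====
-- Pre_ excludes exactly the inputs on which Python A raises KeyError: the truck string is
-- non-empty and some vehicle dict without a 'truck' key is reached before any exact match
-- (B raises there too, at the same vehicle).
def Pre_get_vehicle_gps (truck : String) (vehicles : List (List (String × String))) : Prop :=
  truck = "" ∨ ∀ i < vehicles.length,
    ((PySem.Dict.mk (vehicles.getD i [])).contains "truck" = false →
      ∃ j < i, PySem.Str.replace (PySem.Str.upper (((PySem.Dict.mk (vehicles.getD j [])).get? "truck").getD "")) " " ""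
        = PySem.Str.replace (PySem.Str.upper truck) " " "")
instance (truck : String) (vehicles : List (List (String × String))) : Decidable (Pre_get_vehicle_gps truck vehicles) := by unfold Pre_get_vehicle_gps; infer_instance

def pvWitness_get_vehicle_gps : String × (List (List (String × String))) :=
  ("ab 10", [[("truck", "AB10"), ("gps", "g1"), ("gps_backup", "g2")], [("truck", "CD")]])

def Spec_get_vehicle_gps (truck : String) (vehicles : List (List (String × String))) (out : String × String) : Prop := out = get_vehicle_gps_alt truck vehicles
instance (truck : String) (vehicles : List (List (String × String))) (out : String × String) : Decidable (Spec_get_vehicle_gps truck vehicles out) := by unfold Spec_get_vehicle_gps; infer_instance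

-- ===== CLAIM (what is proved, stated in full; the proofs are below) =====
def Claim_equal_get_vehicle_gps : Prop := ∀ (truck : String) (vehicles : List (List (String × String))), Dom_get_vehicle_gps truck vehicles → Pre_get_vehicle_gps truck vehicles → Spec_get_vehicle_gps truck vehicles (get_vehicle_gps truck vehicles)

-- ===== LEMMAS AND PROOFS =====

-- loop invariant: the single pass equals "exact pass, else stored fallback, else fuzzy pass"
theorem pvB_scan_eq (tu : String) (fallback : Option (String × String))
    (vs : List (List (String × String))) :
    pvB_scan tu fallback vs =
      match pvA_exact tu vs with
      | some r => r
      | none => fallback.getD ((pvA_fuzzy tu vs).getD ("", "")) := by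
  induction vs generalizing fallback with
  | nil => simp [pvB_scan, pvA_exact, pvA_fuzzy]
  | cons v rest ih =>
    simp only [pvB_scan, pvA_exact, pvA_fuzzy, pvNorm]
    by_cases hx : PySem.Str.replace (PySem.Str.upper (((PySem.Dict.mk v).get? "truck").getD "")) " " "" = tu
    · simp [hx]
    · simp only [hx, if_false]
      rw [ih]
      cases pvA_exact tu rest with
      | some r => simp
      | none =>
        cases fallback with
        | some c => simp
        | none => split_ifs <;> simp_all

-- ===== VERDICT (by name: the statement is the Claim_ definition above) =====
theorem get_vehicle_gps_spec : Claim_equal_get_vehicle_gps := by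
  intro truck vehicles _ _
  unfold Spec_get_vehicle_gps get_vehicle_gps get_vehicle_gps_alt
  by_cases h : truck.toList = []
  · simp [h]
  · simp only [h, if_false]
    rw [pvB_scan_eq]
    simp only [pvNorm]
    cases pvA_exact (PySem.Str.replace (PySem.Str.upper truck) " " "") vehicles <;>
      cases pvA_fuzzy (PySem.Str.replace (PySem.Str.upper truck) " " "") vehicles <;> rfl
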